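-- pv_equiv track=rewrite | github.com/Jv131103/estudos_logica | lab/python/somas/soma_cubo_impares.py | cubo_com_impares
-- ===== SOURCE A (Python) =====
-- def cubo_com_impares(m):
--     resultado = {}
--     for n in range(1, m+1):
--         a = n*n - n + 1                 # primeiro ímpar
--         seq = [a + 2*k for k in range(n)]
--         assert sum(seq) == n**3         # só pra conferência
--         resultado[n] = seq
--     return resultado
-- ===== SOURCE B (Python) =====
-- def cubo_com_impares(m):
--     resultado = {}
--     proximo_impar = 1
--     for n in range(1, m+1):
--         seq = []
--         for _ in range(n):
--             seq.append(proximo_impar)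
--             proximo_impar += 2
--         resultado[n] = seq
--     return resultado
-- ===== Notes on version B (the rewrite author's own statement) =====
-- stated objective: alternative
-- what changed: B drops the per-n closed-form first-odd a = n*n-n+1 (and the always-true assert) and instead threads one running odd counter across the whole outer loop, consuming the continuous stream of odd numbers 1,3,5,... to fill each sequence.
import Mathlib
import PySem

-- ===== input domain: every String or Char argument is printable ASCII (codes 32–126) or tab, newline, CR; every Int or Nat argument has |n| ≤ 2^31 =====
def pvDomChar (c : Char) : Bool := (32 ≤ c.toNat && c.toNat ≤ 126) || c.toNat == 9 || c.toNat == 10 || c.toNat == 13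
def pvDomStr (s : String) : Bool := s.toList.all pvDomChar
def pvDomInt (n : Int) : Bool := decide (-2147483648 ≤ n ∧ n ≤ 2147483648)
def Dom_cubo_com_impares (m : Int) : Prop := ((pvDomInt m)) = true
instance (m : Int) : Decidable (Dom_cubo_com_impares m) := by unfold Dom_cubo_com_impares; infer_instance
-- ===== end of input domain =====

-- B replaces A's per-n closed-form first odd (a = n*n-n+1) by one running odd counter
-- threaded across the outer loop (objective: alternative decomposition, same cost).

-- ===== PORT A =====
-- dict keys n are the strictly increasing 1..m, so each resultado[n] = seq is a fresh
-- key: the insertion-ordered dict is ported as appending the pair to an assoc list.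
def cubo_com_impares (m : Int) : List (Int × List Int) :=
  (PySem.List.pyRange 1 (m + 1) 1).foldl
    (fun resultado n =>
      let a := n * n - n + 1
      let seq := (PySem.List.pyRange 0 n 1).map (fun k => a + 2 * k)
      resultado ++ [(n, seq)])
    []

-- ===== PORT B =====
-- state = (resultado, proximo_impar); inner loop appends the counter and bumps it by 2.
def cubo_com_impares_alt (m : Int) : List (Int × List Int) :=
  ((PySem.List.pyRange 1 (m + 1) 1).foldl
    (fun (st : List (Int × List Int) × Int) n =>
      let r := (PySem.List.pyRange 0 n 1).foldl
        (fun (p : List Int × Int) _ => (p.1 ++ [p.2], p.2 + 2))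
        ([], st.2)
      (st.1 ++ [(n, r.1)], r.2))
    ([], 1)).1

-- ===== PRECONDITION & SPEC =====
def Spec_cubo_com_impares (m : Int) (out : List (Int × List Int)) : Prop := out = cubo_com_impares_alt m
instance (m : Int) (out : List (Int × List Int)) : Decidable (Spec_cubo_com_impares m out) := by unfold Spec_cubo_com_impares; infer_instance

-- ===== CLAIM (what is proved, stated in full; the proofs are below) =====
def Claim_equal_cubo_com_impares : Prop := ∀ (m : Int), Dom_cubo_com_impares m → Spec_cubo_com_impares m (cubo_com_impares m)

-- ===== LEMMAS AND PROOFS =====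

-- B's inner loop over any index list: appends the arithmetic run starting at p, step 2.
lemma inner_loop (l : List Int) (s : List Int) (p : Int) :
    l.foldl (fun (q : List Int × Int) _ => (q.1 ++ [q.2], q.2 + 2)) (s, p)
      = (s ++ (List.range l.length).map (fun k : Nat => p + 2 * k), p + 2 * l.length) := by
  induction l generalizing s p with
  | nil => simp
  | cons x xs ih =>
    rw [List.foldl_cons, ih, List.length_cons, List.range_succ_eq_map,
        List.map_cons, List.map_map]
    refine Prod.ext ?_ ?_
    · simp only [List.append_assoc, List.singleton_append, Nat.cast_zero, mul_zero, add_zero]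
      refine congrArg (fun t => s ++ p :: t) ?_
      refine List.map_congr_left ?_
      intro k _
      simp only [Function.comp_apply]
      push_cast; ring
    · simp only []
      push_cast; ring

-- the outer invariant: after processing n = 1..M, B's state is (A's list so far, M²+M+1)
lemma outer_invariant (M : Nat) :
    ((List.range M).map (fun k : Nat => (1 : Int) + k)).foldl
        (fun (st : List (Int × List Int) × Int) n =>
          let r := (PySem.List.pyRange 0 n 1).foldl
            (fun (p : List Int × Int) _ => (p.1 ++ [p.2], p.2 + 2))
            ([], st.2)
          (st.1 ++ [(n, r.1)], r.2))
        ([], 1)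
      = (((List.range M).map (fun k : Nat => (1 : Int) + k)).foldl
          (fun resultado n =>
            let a := n * n - n + 1
            let seq := (PySem.List.pyRange 0 n 1).map (fun k => a + 2 * k)
            resultado ++ [(n, seq)])
          [],
        (M : Int) * M + M + 1) := by
  induction M with
  | zero => simp
  | succ M ih =>
    rw [List.range_succ, List.map_append, List.foldl_append, List.foldl_append, ih]
    simp only [List.map_cons, List.map_nil, List.foldl_cons, List.foldl_nil]
    have hlen : ((1 : Int) + M - 0).toNat = M + 1 := by omega
    have hrange : PySem.List.pyRange 0 ((1 : Int) + M) 1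
        = (List.range (M + 1)).map (fun k : Nat => (0 : Int) + k) := by
      rw [PySem.List.pyRange_one, hlen]
    rw [hrange, inner_loop]
    simp only [List.length_map, List.length_range]
    refine Prod.ext ?_ ?_
    · simp only [List.nil_append, List.map_map]
      refine congrArg₂ (· ++ ·) rfl (congrArg (fun l => [((1 : Int) + (M : Int), l)]) ?_)
      refine List.map_congr_left ?_
      intro k _
      simp only [Function.comp_apply]
      push_cast; ring
    · simp only []
      push_cast
      ring

lemma cubo_eq (m : Int) : cubo_com_impares m = cubo_com_impares_alt m := by
  unfold cubo_com_impares cubo_com_impares_alt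
  rw [PySem.List.pyRange_one]
  have h : (m + 1 - 1).toNat = m.toNat := by omega
  rw [h, outer_invariant]

-- ===== VERDICT (by name: the statement is the Claim_ definition above) =====
theorem cubo_com_impares_spec : Claim_equal_cubo_com_impares := by
  intro m _
  unfold Spec_cubo_com_impares
  exact cubo_eq m
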